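-- pv_equiv track=rewrite | github.com/bashiron/Riposte | thread_reader/threads/mock_provider.py | last_mention_ending
-- ===== SOURCE A (Python) =====
-- def last_mention_ending(pos_ls):
--     shifted = shift(pos_ls)
--     consec = [consecutive(pos) for pos in shifted]
--     cons_pos = []
--
--     for i in range(len(pos_ls)):
--         if consec[i]:
--             cons_pos.append(pos_ls[i])
--         else:
--             break
--
--     try:
--         end = cons_pos[-1][1]
--     except IndexError:
--         end = 0
--     return end
--
-- def shift(ls):
--     my_ls = ls.copy()
--     my_ls.append((None, None))
--     ret = []
--     prev = (None, None)
--
--     for item in my_ls: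
--         ret.append((prev[1], item[0]))
--         prev = item
--
--     ret.pop()
--     return ret
--
-- def consecutive(tup):
--     return tup[0] is None or tup[1] == tup[0] + 1
-- ===== SOURCE B (Python) =====
-- def last_mention_ending(pos_ls):
--     end = 0
--     prev_end = None
--     for pos in pos_ls:
--         if prev_end is None or pos[0] == prev_end + 1:
--             end = pos[1]
--             prev_end = pos[1]
--         else:
--             break
--     return end
-- ===== Notes on version B (the rewrite author's own statement) =====
-- stated objective: simpler
-- what changed: Replaced the shift helper, the consecutive list comprehension and the intermediate cons_pos list by one fused early-exit pass that tracks only the previous run end and the current answer.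
import Mathlib
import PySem

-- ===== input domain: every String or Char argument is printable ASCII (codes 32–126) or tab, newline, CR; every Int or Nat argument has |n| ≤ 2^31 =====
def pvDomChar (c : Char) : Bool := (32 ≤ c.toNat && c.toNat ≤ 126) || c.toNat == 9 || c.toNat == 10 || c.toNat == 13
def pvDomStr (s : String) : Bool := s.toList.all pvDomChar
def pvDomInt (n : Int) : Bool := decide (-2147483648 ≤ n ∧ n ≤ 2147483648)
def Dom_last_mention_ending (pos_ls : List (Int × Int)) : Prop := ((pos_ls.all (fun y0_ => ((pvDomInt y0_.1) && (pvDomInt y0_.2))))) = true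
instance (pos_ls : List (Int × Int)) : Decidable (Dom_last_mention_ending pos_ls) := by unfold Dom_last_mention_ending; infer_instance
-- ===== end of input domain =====

-- B fuses A's shift/consecutive/collect passes into one early-exit loop tracking only the previous run end (objective: simpler).


-- ===== PORT A =====
-- shift(ls): append a (None,None) sentinel, fold building (prev[1], item[0]) pairs, pop the last
def shiftA (ls : List (Int × Int)) : List (Option Int × Option Int) :=
  let my_ls : List (Option Int × Option Int) :=
    (ls.map (fun p => (some p.1, some p.2))) ++ [(none, none)]
  let ret := (my_ls.foldl
      (fun (st : List (Option Int × Option Int) × (Option Int × Option Int)) item =>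
        (st.1 ++ [(st.2.2, item.1)], item)) ([], (none, none))).1
  ret.dropLast

-- consecutive(tup): tup[0] is None or tup[1] == tup[0] + 1
def consecutiveA (t : Option Int × Option Int) : Bool :=
  match t.1 with
  | none => true
  | some a => t.2 == some (a + 1)

-- the for-i/break loop collecting pos_ls[i] while consec[i]
def collectA : List Bool → List (Int × Int) → List (Int × Int)
  | true :: cs, p :: ps => p :: collectA cs ps
  | _, _ => []

def last_mention_ending (pos_ls : List (Int × Int)) : Int :=
  let shifted := shiftA pos_ls
  let consec := shifted.map consecutiveA
  let cons_pos := collectA consec pos_ls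
  match cons_pos.getLast? with   -- cons_pos[-1][1], IndexError -> 0
  | some p => p.2
  | none => 0

-- ===== PORT B =====
-- single early-exit pass: end / prev_end state
def goB : List (Int × Int) → Int → Option Int → Int
  | [], e, _ => e
  | p :: ps, e, prevEnd =>
    match prevEnd with
    | none => goB ps p.2 (some p.2)
    | some pe => if p.1 == pe + 1 then goB ps p.2 (some p.2) else e

def last_mention_ending_alt (pos_ls : List (Int × Int)) : Int :=
  goB pos_ls 0 none

-- ===== PRECONDITION & SPEC =====
def Spec_last_mention_ending (pos_ls : List (Int × Int)) (out : Int) : Prop := out = last_mention_ending_alt pos_ls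
instance (pos_ls : List (Int × Int)) (out : Int) : Decidable (Spec_last_mention_ending pos_ls out) := by unfold Spec_last_mention_ending; infer_instance

-- ===== CLAIM (what is proved, stated in full; the proofs are below) =====
def Claim_equal_last_mention_ending : Prop := ∀ (pos_ls : List (Int × Int)), Dom_last_mention_ending pos_ls → Spec_last_mention_ending pos_ls (last_mention_ending pos_ls)

-- ===== LEMMAS AND PROOFS =====

-- closed form of the chain of (previous end, current start) pairs
def chainOpt (pe : Option Int) : List (Int × Int) → List (Option Int × Option Int)
  | [] => []
  | p :: ps => (pe, some p.1) :: chainOpt (some p.2) ps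

-- closed form of shiftA's fold
def chainRaw (pe : Option Int) : List (Option Int × Option Int) → List (Option Int × Option Int)
  | [] => []
  | x :: xs => (pe, x.1) :: chainRaw x.2 xs

theorem foldl_shift (l : List (Option Int × Option Int))
    (acc : List (Option Int × Option Int)) (prev : Option Int × Option Int) :
    (l.foldl
      (fun (st : List (Option Int × Option Int) × (Option Int × Option Int)) item =>
        (st.1 ++ [(st.2.2, item.1)], item)) (acc, prev)).1
      = acc ++ chainRaw prev.2 l := by
  induction l generalizing acc prev with
  | nil => simp [chainRaw]
  | cons x xs ih => simp [List.foldl, chainRaw, ih]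

def lastEndOf (pe : Option Int) : List (Int × Int) → Option Int
  | [] => pe
  | p :: ps => lastEndOf (some p.2) ps

theorem chainRaw_map_append (ls : List (Int × Int)) (pe : Option Int) :
    chainRaw pe ((ls.map (fun p => (some p.1, some p.2))) ++ [((none : Option Int), (none : Option Int))])
      = chainOpt pe ls ++ [(lastEndOf pe ls, none)] := by
  induction ls generalizing pe with
  | nil => simp [chainRaw, chainOpt, lastEndOf]
  | cons p ps ih => simp [chainRaw, chainOpt, lastEndOf, ih]

theorem shiftA_eq (ls : List (Int × Int)) : shiftA ls = chainOpt none ls := by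
  simp only [shiftA, foldl_shift, chainRaw_map_append]
  simp

theorem matchLast (p : Int × Int) (rest : List (Int × Int)) (e : Int) :
    (match (p :: rest).getLast? with | some r => r.2 | none => e)
      = (match rest.getLast? with | some r => r.2 | none => p.2) := by
  cases rest with
  | nil => simp
  | cons x xs =>
    rw [List.getLast?_cons_cons]
    cases h : (x :: xs).getLast? with
    | none => simp at h
    | some r => rfl

theorem main_lemma (ps : List (Int × Int)) (pe : Int) :
    goB ps pe (some pe)
      = (match (collectA ((chainOpt (some pe) ps).map consecutiveA) ps).getLast? with
         | some r => r.2 | none => pe) := by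
  induction ps generalizing pe with
  | nil => simp [chainOpt, collectA, goB]
  | cons p ps ih =>
    by_cases h : p.1 = pe + 1
    · simp only [chainOpt, consecutiveA, List.map, goB, h, beq_self_eq_true, if_true, collectA]
      rw [matchLast, ih p.2]
    · simp [chainOpt, consecutiveA, goB, h, collectA]

-- ===== VERDICT (by name: the statement is the Claim_ definition above) =====
theorem last_mention_ending_spec : Claim_equal_last_mention_ending := by
  intro pos_ls _
  unfold Spec_last_mention_ending last_mention_ending last_mention_ending_alt
  rw [shiftA_eq]
  cases pos_ls with
  | nil => simp [chainOpt, collectA, goB]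
  | cons p ps =>
    simp only [chainOpt, consecutiveA, List.map, collectA, goB]
    rw [matchLast, ← main_lemma ps p.2]
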